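-- pv_equiv track=rewrite | github.com/SamueleVanini/Git_Hook | py-comment-counter/Components/Comment_Control.py | _is_hashtag_comment
-- ===== SOURCE A (Python) =====
-- def _is_hashtag_comment(line):
--     """
--     Check if the '#' is a comment or into a string
--     :param line: line to control
--     :return True/False: boolean to indicate if '#' is a comment or into a string
--     """
--     comment_block = False
--     for letter in line:
--         if letter == '\'' or letter == '\"':
--             comment_block = False if comment_block else True
--         if letter == '#' and comment_block is False:
--             return True
--         if letter == '#' and comment_block is True:
--             return False
-- ===== SOURCE B (Python) =====
-- def _is_hashtag_comment(line):
--     idx = line.find('#')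
--     if idx == -1:
--         return None
--     prefix = line[:idx]
--     return (prefix.count("'") + prefix.count('"')) % 2 == 0
-- ===== Notes on version B (the rewrite author's own statement) =====
-- stated objective: idiomatic
-- what changed: Replaces the character-by-character quote-toggle loop with a locate-then-count decomposition: str.find locates the first hash character and the parity of quote characters in the prefix before it gives the answer.
import Mathlib
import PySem

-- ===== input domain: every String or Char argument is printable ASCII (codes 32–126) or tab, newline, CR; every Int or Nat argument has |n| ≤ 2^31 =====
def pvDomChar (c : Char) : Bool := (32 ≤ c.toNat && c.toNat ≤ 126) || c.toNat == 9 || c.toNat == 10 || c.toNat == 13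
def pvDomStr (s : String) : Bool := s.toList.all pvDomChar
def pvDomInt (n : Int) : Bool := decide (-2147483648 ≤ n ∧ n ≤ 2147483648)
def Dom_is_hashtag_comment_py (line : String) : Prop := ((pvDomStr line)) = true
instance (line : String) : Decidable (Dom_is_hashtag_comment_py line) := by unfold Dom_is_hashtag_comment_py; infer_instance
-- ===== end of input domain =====

-- B replaces A's fused quote-toggle scan by find-first-'#' then quote-count parity on the prefix (idiomatic decomposition, same cost).

-- ===== PORT A =====
-- the for-loop of A, carrying the comment_block flag; falls off the end → Python's implicit None
def pvALoop : List Char → Bool → Option Bool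
  | [], _ => none
  | letter :: rest, cb =>
    let cb := if letter = '\'' ∨ letter = '\"' then (if cb then false else true) else cb
    if letter = '#' ∧ cb = false then some true
    else if letter = '#' ∧ cb = true then some false
    else pvALoop rest cb

def is_hashtag_comment_py (line : String) : Option Bool := pvALoop line.toList false

-- ===== PORT B =====
def is_hashtag_comment_py_alt (line : String) : Option Bool :=
  let idx := PySem.Str.find line "#"
  if idx = -1 then none
  else
    let pre := PySem.Str.slice line none (some idx)
    some (decide ((PySem.Str.count pre "'" + PySem.Str.count pre "\"") % 2 = 0))

-- ===== PRECONDITION & SPEC =====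
def Spec_is_hashtag_comment_py (line : String) (out : Option Bool) : Prop := out = is_hashtag_comment_py_alt line
instance (line : String) (out : Option Bool) : Decidable (Spec_is_hashtag_comment_py line out) := by unfold Spec_is_hashtag_comment_py; infer_instance

-- ===== CLAIM (what is proved, stated in full; the proofs are below) =====
def Claim_equal_is_hashtag_comment_py : Prop := ∀ (line : String), Dom_is_hashtag_comment_py line → Spec_is_hashtag_comment_py line (is_hashtag_comment_py line)

-- ===== LEMMAS AND PROOFS =====

-- Chars.count with a single-character needle is List.count
theorem pv_count_go_singleton (c : Char) (cs : List Char) (fuel acc : Nat)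
    (h : cs.length ≤ fuel) :
    PySem.Chars.count.go [c] fuel cs acc = acc + cs.count c := by
  induction cs generalizing fuel acc with
  | nil => cases fuel <;> simp [PySem.Chars.count.go]
  | cons x t ih =>
    cases fuel with
    | zero => simp at h
    | succ n =>
      simp only [List.length_cons, Nat.succ_le_succ_iff] at h
      by_cases hx : x = c
      · subst hx
        simp [PySem.Chars.count.go, List.isPrefixOf, ih n (acc + 1) h]
        omega
      · simp [PySem.Chars.count.go, List.isPrefixOf, hx, ih n acc h, Ne.symm hx]

theorem pv_count_singleton (c : Char) (cs : List Char) :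
    PySem.Chars.count cs [c] = cs.count c := by
  simpa [PySem.Chars.count] using pv_count_go_singleton c cs cs.length 0 le_rfl

-- A's loop returns none when no '#' occurs
theorem pv_aLoop_none (cs : List Char) (cb : Bool) (h : '#' ∉ cs) :
    pvALoop cs cb = none := by
  induction cs generalizing cb with
  | nil => rfl
  | cons x t ih =>
    simp only [List.mem_cons, not_or] at h
    have hx : x ≠ '#' := fun e => h.1 e.symm
    simp only [pvALoop]
    split_ifs <;> first
      | exact ih _ h.2
      | (rename_i hc; exact absurd hc.1 hx)

-- A's loop on prefix ++ '#' :: rest with no '#' in the prefix: quote parity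
theorem pv_aLoop_hash (p t : List Char) (cb : Bool) (h : '#' ∉ p) :
    pvALoop (p ++ '#' :: t) cb =
      some (decide ((p.count '\'' + p.count '\"' + (if cb then 1 else 0)) % 2 = 0)) := by
  induction p generalizing cb with
  | nil =>
    cases cb <;> simp [pvALoop]
  | cons x p' ih =>
    simp only [List.mem_cons, not_or] at h
    have hxh : x ≠ '#' := fun e => h.1 e.symm
    by_cases hq : x = '\'' ∨ x = '\"'
    · have : pvALoop ((x :: p') ++ '#' :: t) cb = pvALoop (p' ++ '#' :: t) (!cb) := by
        cases cb <;> simp [pvALoop, hq, hxh]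
      rw [this, ih _ h.2]
      rcases hq with hq | hq <;> subst hq <;> cases cb <;>
        (rw [List.count_cons, List.count_cons]; simp; omega)
    · rw [not_or] at hq
      have : pvALoop ((x :: p') ++ '#' :: t) cb = pvALoop (p' ++ '#' :: t) cb := by
        simp [pvALoop, hq.1, hq.2, hxh]
      rw [this, ih _ h.2]
      rw [List.count_cons, List.count_cons]
      simp [hq.1, hq.2]

theorem pv_singleton_prefix (c : Char) (l : List Char) :
    [c] <+: l ↔ ∃ t, l = c :: t := by
  cases l with
  | nil => simp
  | cons x t =>
    constructor
    · rintro ⟨s, hs⟩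
      simp at hs
      exact ⟨t, by simp [hs.1]⟩
    · rintro ⟨t', ht⟩
      simp at ht
      exact ⟨t, by simp [ht.1]⟩

-- ===== VERDICT (by name: the statement is the Claim_ definition above) =====
theorem is_hashtag_comment_py_spec : Claim_equal_is_hashtag_comment_py := by
  intro line _
  unfold Spec_is_hashtag_comment_py is_hashtag_comment_py is_hashtag_comment_py_alt
  set cs := line.toList with hcs
  by_cases hmem : '#' ∈ cs
  · -- find succeeds
    have hfind : PySem.Chars.find cs ['#'] ≠ -1 := by
      rw [PySem.Chars.find_ne_neg_one_iff]
      exact (List.singleton_infix_iff '#' cs).mpr hmem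
    have hnn : 0 ≤ PySem.Chars.find cs ['#'] := by
      have := PySem.Chars.neg_one_le_find (s := cs) (sub := ['#'])
      omega
    obtain ⟨hpre, hmin⟩ := PySem.Chars.find_spec hnn
    set j := (PySem.Chars.find cs ['#']).toNat with hj
    obtain ⟨t, ht⟩ := (pv_singleton_prefix _ _).mp hpre
    have hjlt : j < cs.length := by
      by_contra hge
      rw [List.drop_eq_nil_of_le (not_lt.mp hge)] at ht
      exact absurd ht (by simp)
    have hsplit : cs = cs.take j ++ '#' :: t := by
      conv_lhs => rw [← List.take_append_drop j cs]
      rw [ht]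
    have hnp : '#' ∉ cs.take j := by
      intro hin
      obtain ⟨i, hilt, hgi⟩ := List.mem_iff_getElem.mp hin
      have hlen : i < j := lt_of_lt_of_le hilt (by simp)
      apply hmin i hlen
      rw [pv_singleton_prefix]
      refine ⟨cs.drop (i + 1), ?_⟩
      rw [List.drop_eq_getElem_cons (by omega)]
      congr 1
      simpa using hgi
    rw [PySem.Str.find_eq]
    have hhl : ("#" : String).toList = ['#'] := rfl
    rw [hhl]
    simp only [← hcs]
    rw [if_neg hfind]
    have hslice : (PySem.Str.slice line none (some (PySem.Chars.find cs ['#']))).toList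
        = cs.take j := by
      simp [PySem.Str.slice, PySem.Chars.slice_eq_listSlice, ← hcs,
        PySem.List.slice_to _ hnn, hj]
    rw [PySem.Str.count_eq, PySem.Str.count_eq, hslice]
    have h1 : ("'" : String).toList = ['\''] := rfl
    have h2 : ("\"" : String).toList = ['\"'] := rfl
    rw [h1, h2, pv_count_singleton, pv_count_singleton]
    conv_lhs => rw [hsplit]
    rw [pv_aLoop_hash _ _ _ hnp]
    simp
  · -- no '#': both none
    have hfind : PySem.Chars.find cs ['#'] = -1 := by
      rw [PySem.Chars.find_eq_neg_one_iff]
      rw [List.singleton_infix_iff]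
      exact hmem
    rw [pv_aLoop_none cs false hmem, PySem.Str.find_eq]
    have hhl : ("#" : String).toList = ['#'] := rfl
    rw [hhl]
    simp only [← hcs]
    rw [hfind]
    simp
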